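-- pv_equiv track=rewrite | github.com/reeeneeee/tee-talk | scripts/tag-notes.py | tag_chapter
-- ===== SOURCE A (Python) =====
-- def is_prose_line(line):
--     """A line that looks like prose commentary rather than poetry."""
--     stripped = line.strip()
--     if not stripped:
--         return False
--     # Prose lines are typically > 55 chars and don't start with poem-like patterns
--     return len(stripped) > 55
--
-- def tag_chapter(text):
--     """Given the body text of a chapter (after the CHAPTER heading),
--     find where the poem ends and commentary begins, and wrap commentary in [NOTE]."""
--     lines = text.split('\n')
--
--     # Find the transition from poem to prose
--     # Walk backwards from the end to find where prose starts
--     last_poem_line = len(lines) - 1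
--
--     # Skip trailing empty lines
--     while last_poem_line >= 0 and not lines[last_poem_line].strip():
--         last_poem_line -= 1
--
--     if last_poem_line < 0:
--         return text
--
--     # Walk backwards through prose lines to find where poem ends
--     prose_start = last_poem_line + 1
--     i = last_poem_line
--     consecutive_prose = 0
--     while i >= 0:
--         if is_prose_line(lines[i]):
--             consecutive_prose += 1
--             if consecutive_prose >= 2:
--                 # Found at least 2 consecutive prose lines - this is commentary
--                 # Walk back to find the start of the prose block
--                 while i >= 0 and (is_prose_line(lines[i]) or not lines[i].strip()):
--                     i -= 1
--                 prose_start = i + 1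
--                 break
--         else:
--             consecutive_prose = 0
--         i -= 1
--
--     if prose_start > last_poem_line:
--         # No prose found
--         return text
--
--     # Check that there's actual content in the prose section
--     prose_text = '\n'.join(lines[prose_start:]).strip()
--     if len(prose_text) < 30:
--         return text
--
--     poem_part = '\n'.join(lines[:prose_start]).rstrip()
--     note_part = '\n'.join(lines[prose_start:]).strip()
--
--     return f"{poem_part}\n\n[NOTE]\n{note_part}\n[/NOTE]"
-- ===== SOURCE B (Python) =====
-- def tag_chapter(text):
--     """Given the body text of a chapter (after the CHAPTER heading),
--     find where the poem ends and commentary begins, and wrap commentary in [NOTE]."""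
--     lines = text.split('\n')
--
--     def prose(line):
--         return len(line.strip()) > 55
--
--     # indices of non-blank lines; the last one is where the content ends
--     nonblank = [i for i in range(len(lines)) if lines[i].strip()]
--     if not nonblank:
--         return text
--     last = nonblank[-1]
--
--     # last pair of immediately adjacent prose lines at or before `last`
--     pairs = [i for i in range(last) if prose(lines[i]) and prose(lines[i + 1])]
--     if not pairs:
--         return text
--     j = pairs[-1]
--
--     # extend the prose block backwards over prose/blank lines: the commentary
--     # starts right after the last line below j that is neither prose nor blank
--     boundaries = [k for k in range(j) if not prose(lines[k]) and lines[k].strip()]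
--     start = boundaries[-1] + 1 if boundaries else 0
--
--     note = '\n'.join(lines[start:]).strip()
--     if len(note) < 30:
--         return text
--     poem = '\n'.join(lines[:start]).rstrip()
--     return f"{poem}\n\n[NOTE]\n{note}\n[/NOTE]"
-- ===== Notes on version B (the rewrite author's own statement) =====
-- stated objective: simpler
-- what changed: A's three stateful backward while-loops (trailing-blank skip, consecutive-prose counter scan, backward block extension) are replaced by declarative filtered index lists: the last non-blank index, the last adjacent prose pair, and the last non-prose non-blank boundary below it, read off as last elements of comprehensions.
import Mathlib
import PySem

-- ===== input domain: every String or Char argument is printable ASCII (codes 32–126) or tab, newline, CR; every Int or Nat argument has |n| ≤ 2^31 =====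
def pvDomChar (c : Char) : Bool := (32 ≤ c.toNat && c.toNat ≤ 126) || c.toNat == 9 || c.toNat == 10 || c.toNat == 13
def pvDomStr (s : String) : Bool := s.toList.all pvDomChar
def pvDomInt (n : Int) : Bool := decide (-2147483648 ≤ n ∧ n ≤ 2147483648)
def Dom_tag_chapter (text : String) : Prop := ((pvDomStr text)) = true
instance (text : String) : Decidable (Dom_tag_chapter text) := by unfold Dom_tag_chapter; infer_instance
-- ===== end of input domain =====

-- B replaces A's stateful backward while-loops (consecutive-prose counter, backward block
-- extension) by filtered index lists whose last elements give the same positions (objective: simpler).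

-- ===== PORT A =====
def pvIsProseLine (line : String) : Bool :=
  let stripped := PySem.Str.strip line
  if stripped == "" then false
  else decide (55 < PySem.Str.len stripped)
def pvLastScan (lines : List String) : Nat → Option Nat
  | 0 => none
  | i + 1 =>
    if PySem.Str.strip (PySem.List.pyGetD lines (i : Int) "") == "" then pvLastScan lines i
    else some i
def pvWalkBack (lines : List String) : Nat → Nat
  | 0 => 0
  | i + 1 =>
    if pvIsProseLine (PySem.List.pyGetD lines (i : Int) "")
        || PySem.Str.strip (PySem.List.pyGetD lines (i : Int) "") == "" then pvWalkBack lines i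
    else i + 1
def pvScan (lines : List String) : Nat → Nat → Option Nat
  | 0, _ => none
  | i + 1, c =>
    if pvIsProseLine (PySem.List.pyGetD lines (i : Int) "") then
      if c + 1 ≥ 2 then some (pvWalkBack lines (i + 1))
      else pvScan lines i (c + 1)
    else pvScan lines i 0
def tag_chapter (text : String) : String :=
  let lines := (PySem.Str.split? text "\n").getD []
  match pvLastScan lines lines.length with
  | none => text
  | some last =>
    let prose_start : Nat := (pvScan lines (last + 1) 0).getD (last + 1)
    if prose_start > last then text
    else
      let prose_text := PySem.Str.strip (PySem.Str.join "\n" (lines.drop prose_start))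
      if PySem.Str.len prose_text < 30 then text
      else
        let poem_part := PySem.Str.rstrip (PySem.Str.join "\n" (lines.take prose_start))
        poem_part ++ "\n\n[NOTE]\n" ++ prose_text ++ "\n[/NOTE]"


-- ===== PORT B =====
def pvProseB (l : String) : Bool := decide (55 < PySem.Str.len (PySem.Str.strip l))

def tag_chapter_alt (text : String) : String :=
  let lines := (PySem.Str.split? text "\n").getD []
  let nonblank := (List.range lines.length).filter
    (fun (i : Nat) => !(PySem.Str.strip (PySem.List.pyGetD lines (i : Int) "") == ""))
  match nonblank.getLast? with
  | none => text
  | some last =>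
    let pairs := (List.range last).filter
      (fun (i : Nat) => pvProseB (PySem.List.pyGetD lines (i : Int) "")
        && pvProseB (PySem.List.pyGetD lines ((i : Int) + 1) ""))
    match pairs.getLast? with
    | none => text
    | some j =>
      let boundaries := (List.range j).filter
        (fun (k : Nat) => !pvProseB (PySem.List.pyGetD lines (k : Int) "")
          && !(PySem.Str.strip (PySem.List.pyGetD lines (k : Int) "") == ""))
      let start : Nat :=
        match boundaries.getLast? with
        | some k => k + 1
        | none => 0
      let note := PySem.Str.strip (PySem.Str.join "\n" (lines.drop start))
      if PySem.Str.len note < 30 then text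
      else
        PySem.Str.rstrip (PySem.Str.join "\n" (lines.take start)) ++ "\n\n[NOTE]\n" ++ note ++ "\n[/NOTE]"


-- ===== PRECONDITION & SPEC =====
def Spec_tag_chapter (text : String) (out : String) : Prop := out = tag_chapter_alt text
instance (text : String) (out : String) : Decidable (Spec_tag_chapter text out) := by unfold Spec_tag_chapter; infer_instance

-- ===== CLAIM (what is proved, stated in full; the proofs are below) =====
def Claim_equal_tag_chapter : Prop := ∀ (text : String), Dom_tag_chapter text → Spec_tag_chapter text (tag_chapter text)

-- ===== LEMMAS AND PROOFS =====
def pIdx (lines : List String) (i : Nat) : Bool :=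
  pvIsProseLine (PySem.List.pyGetD lines (i : Int) "")
def bIdx (lines : List String) (i : Nat) : Bool :=
  PySem.Str.strip (PySem.List.pyGetD lines (i : Int) "") == ""

theorem pvProseB_eq (l : String) : pvProseB l = pvIsProseLine l := by
  by_cases h : PySem.Str.strip l == ""
  · have h' : PySem.Str.strip l = "" := eq_of_beq h
    simp [pvProseB, pvIsProseLine, h, h']
  · simp [pvProseB, pvIsProseLine, h]

theorem filter_range_succ_getLast? (q : Nat → Bool) (m : Nat) :
    ((List.range (m + 1)).filter q).getLast? =
      if q m then some m else ((List.range m).filter q).getLast? := by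
  rw [List.range_succ, List.filter_append]
  cases h : q m <;> simp [h, List.getLast?_append]

theorem L_last (lines : List String) (m : Nat) :
    pvLastScan lines m = ((List.range m).filter (fun i => !bIdx lines i)).getLast? := by
  induction m with
  | zero => simp [pvLastScan]
  | succ m ih =>
    have hun : pvLastScan lines (m + 1) =
        if bIdx lines m then pvLastScan lines m else some m := rfl
    rw [hun, filter_range_succ_getLast?]
    cases h : bIdx lines m <;> simp [h, ih]

theorem L_walk (lines : List String) (m : Nat) :
    pvWalkBack lines m =
      (match ((List.range m).filter (fun k => !pIdx lines k && !bIdx lines k)).getLast? with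
       | some k => k + 1
       | none => 0) := by
  induction m with
  | zero => simp [pvWalkBack]
  | succ m ih =>
    have hun : pvWalkBack lines (m + 1) =
        if pIdx lines m || bIdx lines m then pvWalkBack lines m else m + 1 := rfl
    rw [hun, filter_range_succ_getLast?]
    cases hp : pIdx lines m <;> cases hb : bIdx lines m <;> simp [hp, hb, ih]

theorem L_walk_le (lines : List String) (m : Nat) : pvWalkBack lines m ≤ m := by
  induction m with
  | zero => simp [pvWalkBack]
  | succ m ih => unfold pvWalkBack; split <;> omega

def pairsLast (lines : List String) (m : Nat) : Option Nat :=
  ((List.range m).filter (fun i => pIdx lines i && pIdx lines (i + 1))).getLast?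

theorem L_scan (lines : List String) (i : Nat) :
    ∀ c : Nat, pvScan lines (i + 1) c =
      if 1 ≤ c ∧ pIdx lines i = true then some (pvWalkBack lines (i + 1))
      else (pairsLast lines i).map (fun j => pvWalkBack lines (j + 1)) := by
  have hun : ∀ n c, pvScan lines (n + 1) c =
      if pIdx lines n then
        (if c + 1 ≥ 2 then some (pvWalkBack lines (n + 1)) else pvScan lines n (c + 1))
      else pvScan lines n 0 := fun n c => rfl
  induction i with
  | zero =>
    intro c
    rw [hun]
    have h2 : (c + 1 ≥ 2) = (1 ≤ c) := propext (by omega)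
    simp only [h2]
    cases hp : pIdx lines 0
    · simp [hp, pvScan, pairsLast]
    · by_cases hc : 1 ≤ c <;> simp [hp, hc, pvScan, pairsLast]
  | succ i ih =>
    intro c
    have hstep : pairsLast lines (i + 1) =
        if pIdx lines i && pIdx lines (i + 1) then some i else pairsLast lines i := by
      unfold pairsLast; rw [filter_range_succ_getLast?]
    rw [hun, hstep]
    cases hp : pIdx lines (i + 1)
    · rw [ih 0]
      simp [hp]
    · by_cases hc : 1 ≤ c
      · have h2 : c + 1 ≥ 2 := by omega
        simp [hp, h2, hc]
      · have hc0 : c = 0 := by omega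
        subst hc0
        have h2 : ¬(0 + 1 ≥ 2) := by omega
        simp only [hp, if_pos rfl, if_neg h2]
        rw [ih 1]
        have hws : pvWalkBack lines (i + 1 + 1) = pvWalkBack lines (i + 1) := by
          have hun2 : pvWalkBack lines (i + 1 + 1) =
              if pIdx lines (i + 1) || bIdx lines (i + 1) then pvWalkBack lines (i + 1)
              else i + 1 + 1 := rfl
          rw [hun2, hp]; simp
        cases hpi : pIdx lines i <;> simp [hpi, hws]

theorem walk_succ_of_prose (lines : List String) (j : Nat) (h : pIdx lines j = true) :
    pvWalkBack lines (j + 1) = pvWalkBack lines j := by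
  have hun : pvWalkBack lines (j + 1) =
      if pIdx lines j || bIdx lines j then pvWalkBack lines j else j + 1 := rfl
  rw [hun, h]; simp


-- ===== VERDICT (by name: the statement is the Claim_ definition above) =====
theorem tag_chapter_spec : Claim_equal_tag_chapter := by
  intro text _
  unfold Spec_tag_chapter
  simp only [tag_chapter, tag_chapter_alt]
  generalize (PySem.Str.split? text "\n").getD [] = lines
  have eb : (fun (i : Nat) => !(PySem.Str.strip (PySem.List.pyGetD lines (i : Int) "") == ""))
      = (fun i => !bIdx lines i) := by funext i; simp [bIdx]
  have ep : (fun (i : Nat) => pvProseB (PySem.List.pyGetD lines (i : Int) "")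
        && pvProseB (PySem.List.pyGetD lines ((i : Int) + 1) ""))
      = (fun i => pIdx lines i && pIdx lines (i + 1)) := by
    funext i
    have h1 : ((i : Int) + 1) = (((i + 1 : Nat)) : Int) := by push_cast; ring
    rw [h1, pvProseB_eq, pvProseB_eq]
    rfl
  have ew : (fun (k : Nat) => !pvProseB (PySem.List.pyGetD lines (k : Int) "")
        && !(PySem.Str.strip (PySem.List.pyGetD lines (k : Int) "") == ""))
      = (fun k => !pIdx lines k && !bIdx lines k) := by
    funext k; rw [pvProseB_eq]; rfl
  rw [eb, ep, ew, ← L_last]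
  cases hlast : pvLastScan lines lines.length with
  | none => rfl
  | some last =>
    dsimp only
    have hscan : pvScan lines (last + 1) 0 =
        (pairsLast lines last).map (fun j => pvWalkBack lines (j + 1)) := by
      rw [L_scan]; simp
    rw [hscan]
    simp only [show ((List.range last).filter
        (fun i => pIdx lines i && pIdx lines (i + 1))).getLast? = pairsLast lines last from rfl]
    cases hpair : pairsLast lines last with
    | none => simp
    | some j =>
      have hmem : j ∈ (List.range last).filter (fun i => pIdx lines i && pIdx lines (i + 1)) :=
        List.mem_of_getLast? hpair
      have hj := List.mem_filter.mp hmem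
      have hj1 : pIdx lines j = true := by
        have := hj.2; simp at this; exact this.1
      have hjlt : j < last := by
        have := hj.1; simpa using this
      have hws : pvWalkBack lines (j + 1) = pvWalkBack lines j := walk_succ_of_prose lines j hj1
      have hle : pvWalkBack lines (j + 1) ≤ last := by
        have := L_walk_le lines (j + 1); omega
      rw [Option.map_some, Option.getD_some]
      rw [if_neg (by omega), hws, L_walk]
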